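-- pv_equiv track=rewrite | github.com/Chakrapani2122/DSM | test2.py | solve
-- ===== SOURCE A (Python) =====
-- def solve(A, B):
--     n = len(A)
--     m = len(B)
--     ans = [0] * m
--     for i in range(m):
--         ans[i] = n
--     for i in range(m):
--         for j in range(n):
--             if A[j][0] <= B[i][0] <= A[j][1] and A[j][2] < B[i][1]:
--                 ans[i] -= 1
--     return ans
-- ===== SOURCE B (Python) =====
-- from bisect import bisect_left
--
-- def solve(A, B):
--     # Offline sweep: ans[i] = n - #{j : A[j][0] <= B[i][0] <= A[j][1], A[j][2] < B[i][1]}.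
--     # The stabbing count splits into two 2D dominance counts,
--     #   F = #{ A[j][0] <= x, w < W }  and  G = #{ max(A[j][0], A[j][1]+1) <= x, w < W },
--     # each computed for all queries at once by sweeping the queries in increasing x
--     # over the points sorted by key, keeping the weights of activated points in a
--     # sorted list queried by binary search.
--     n = len(A)
--     qs = sorted(((q[0], i) for i, q in enumerate(B)), key=lambda t: t[0])
--
--     def dominance(points):
--         pts = sorted(points, key=lambda p: p[0])
--         res = [0] * len(B)
--         weights = []
--         p = 0
--         for x, i in qs:
--             while p < len(pts) and pts[p][0] <= x:
--                 w = pts[p][1]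
--                 weights.insert(bisect_left(weights, w), w)
--                 p += 1
--             res[i] = bisect_left(weights, B[i][1])
--         return res
--
--     F = dominance([(a[0], a[2]) for a in A])
--     G = dominance([(max(a[0], a[1] + 1), a[2]) for a in A])
--     return [n - f + g for f, g in zip(F, G)]
-- ===== Notes on version B (the rewrite author's own statement) =====
-- stated objective: faster
-- what changed: B replaces the n*m pairwise interval/query tests by an offline sweep: the stabbing count splits into two 2D dominance counts (start <= x and max(start, end+1) <= x, weight < W), each answered for all queries at once by sorting points and queries and binary-searching a sorted list of activated weights.
-- outside the precondition, e.g. on solve([[0, 5, 1]], [[10]]): A returns [1], B raises IndexError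
import Mathlib
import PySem

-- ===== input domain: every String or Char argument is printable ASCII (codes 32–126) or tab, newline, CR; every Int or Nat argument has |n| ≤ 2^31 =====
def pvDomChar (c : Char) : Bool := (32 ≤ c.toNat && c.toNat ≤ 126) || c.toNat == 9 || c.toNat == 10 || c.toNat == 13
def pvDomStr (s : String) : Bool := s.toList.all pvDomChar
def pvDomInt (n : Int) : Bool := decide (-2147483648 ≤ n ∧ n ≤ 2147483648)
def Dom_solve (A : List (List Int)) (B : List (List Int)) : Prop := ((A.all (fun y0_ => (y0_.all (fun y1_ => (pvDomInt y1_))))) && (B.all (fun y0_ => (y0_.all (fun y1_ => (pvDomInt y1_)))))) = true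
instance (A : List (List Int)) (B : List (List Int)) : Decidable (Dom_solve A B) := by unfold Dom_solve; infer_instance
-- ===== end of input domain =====

-- B replaces the n*m pairwise tests by an offline sweep: the stabbing count splits into
-- two 2D dominance counts, each answered for all queries at once by sorting points and
-- queries by coordinate and binary-searching a sorted list of activated weights.

-- ===== PORT A =====
-- the chained comparison / `and` of A (total via pyGetD; Pre_ guarantees the indexed
-- entries exist)
def pvChainA (itv q : List Int) : Bool :=
  decide (PySem.List.pyGetD itv 0 0 ≤ PySem.List.pyGetD q 0 0 ∧
          PySem.List.pyGetD q 0 0 ≤ PySem.List.pyGetD itv 1 0 ∧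
          PySem.List.pyGetD itv 2 0 < PySem.List.pyGetD q 1 0)

def solve (A : List (List Int)) (B : List (List Int)) : List Int :=
  let n : Int := A.length
  let m : Int := B.length
  let ans0 : List Int := List.replicate B.length 0
  let ans1 := (PySem.List.pyRange 0 m 1).foldl
    (fun ans i => PySem.List.pySetD ans i n) ans0
  (PySem.List.pyRange 0 m 1).foldl (fun ans i =>
    (PySem.List.pyRange 0 n 1).foldl (fun ans j =>
      if pvChainA (PySem.List.pyGetD A j []) (PySem.List.pyGetD B i [])
      then PySem.List.pySetD ans i (PySem.List.pyGetD ans i 0 - 1)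
      else ans) ans) ans1

-- ===== PORT B =====
-- the `while p < len(pts) and pts[p][0] <= x:` pointer advance: consume the activated
-- prefix of the remaining points, inserting each weight into the sorted list at the
-- position found by bisect_left (Source B: `weights.insert(bisect_left(weights, w), w)`)
def pvAdvance (x : Int) : List (Int × Int) → List Int → List (Int × Int) × List Int
  | [], ws => ([], ws)
  | p :: rest, ws =>
    if p.1 ≤ x then
      pvAdvance x rest
        (PySem.List.insert ws ((PySem.List.bisectLeft ws p.2 : Nat) : Int) p.2)
    else (p :: rest, ws)

-- body of the `for x, i in qs:` loop; state = (remaining points, weights, res)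
def pvStep (B : List (List Int)) (st : List (Int × Int) × List Int × List Int)
    (xi : Int × Int) : List (Int × Int) × List Int × List Int :=
  let aw := pvAdvance xi.1 st.1 st.2.1
  (aw.1, aw.2,
    PySem.List.pySetD st.2.2 xi.2
      ((PySem.List.bisectLeft aw.2
        (PySem.List.pyGetD (PySem.List.pyGetD B xi.2 []) 1 0) : Nat) : Int))

-- Source B's `dominance(points)` (closing over B and qs)
def pvSweepCnt (B : List (List Int)) (qs : List (Int × Int))
    (points : List (Int × Int)) : List Int :=
  (qs.foldl (pvStep B)
    (PySem.List.sorted points (fun p => p.1), [], List.replicate B.length 0)).2.2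

def solve_alt (A : List (List Int)) (B : List (List Int)) : List Int :=
  let n : Int := A.length
  let qs := PySem.List.sorted
    ((PySem.List.enumerate B).map (fun p => (PySem.List.pyGetD p.2 0 0, p.1)))
    (fun t => t.1)
  let F := pvSweepCnt B qs
    (A.map (fun a => (PySem.List.pyGetD a 0 0, PySem.List.pyGetD a 2 0)))
  let G := pvSweepCnt B qs
    (A.map (fun a => (max (PySem.List.pyGetD a 0 0) (PySem.List.pyGetD a 1 0 + 1),
                      PySem.List.pyGetD a 2 0)))
  List.zipWith (fun f g => n - f + g) F G

-- ===== PRECONDITION & SPEC =====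
-- Pre_ restricts to the task's natural shape: every interval has (at least) its three
-- entries and every query its two. A also returns on some ragged rows where its chained
-- comparison short-circuits before the missing entry; B's sweep reads every entry up
-- front and raises IndexError there, so those inputs are excluded.
def Pre_solve (A : List (List Int)) (B : List (List Int)) : Prop :=
  (∀ itv ∈ A, 3 ≤ itv.length) ∧ (∀ q ∈ B, 2 ≤ q.length)
instance (A : List (List Int)) (B : List (List Int)) : Decidable (Pre_solve A B) := by
  unfold Pre_solve; infer_instance

def pvWitness_solve : List (List Int) × List (List Int) :=
  ([[0, 5, 1], [2, 3, 7]], [[2, 3], [4, 0]])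

def Spec_solve (A : List (List Int)) (B : List (List Int)) (out : List Int) : Prop := out = solve_alt A B
instance (A : List (List Int)) (B : List (List Int)) (out : List Int) : Decidable (Spec_solve A B out) := by unfold Spec_solve; infer_instance

-- ===== CLAIM (what is proved, stated in full; the proofs are below) =====
def Claim_equal_solve : Prop := ∀ (A : List (List Int)) (B : List (List Int)), Dom_solve A B → Pre_solve A B → Spec_solve A B (solve A B)

-- ===== LEMMAS AND PROOFS =====

-- 0/1 indicator of one interval counting against one query
def pvInd (itv q : List Int) : Int := if pvChainA itv q then 1 else 0

-- total count of intervals hitting query q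
def pvCnt (A : List (List Int)) (q : List Int) : Int :=
  (A.map (fun itv => pvInd itv q)).sum

-- 2D dominance count over a point list
def pvCnt2 (pts : List (Int × Int)) (x W : Int) : Nat :=
  pts.countP (fun p => decide (p.1 ≤ x ∧ p.2 < W))

-- number of weights below W
def pvCw (ws : List Int) (W : Int) : Nat :=
  ws.countP (fun w => decide (w < W))

-- the query coordinate and threshold of query index i (totalised like the ports)
def pvX (B : List (List Int)) (i : Int) : Int :=
  PySem.List.pyGetD (PySem.List.pyGetD B i []) 0 0
def pvW (B : List (List Int)) (i : Int) : Int :=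
  PySem.List.pyGetD (PySem.List.pyGetD B i []) 1 0

-- ---- A-side characterisation (A returns [n - pvCnt A (B[k]) for k]) ----

theorem pv_init_fold (n : Int) (t : Nat) (ans : List Int) :
    (PySem.List.pyRange 0 (t : Int) 1).foldl
        (fun ans i => PySem.List.pySetD ans i n) ans
      = ans.mapIdx (fun k v => if k < t then n else v) := by
  induction t generalizing ans with
  | zero =>
    rw [show ((0 : Nat) : Int) = 0 from rfl, PySem.List.pyRange_one_eq_nil (le_refl 0),
      List.foldl_nil]
    apply List.ext_getElem
    · simp
    · intro k h1 h2; simp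
  | succ t ih =>
    have hsplit : PySem.List.pyRange 0 ((t : Int) + 1) 1
        = PySem.List.pyRange 0 (t : Int) 1 ++ [(t : Int)] :=
      PySem.List.pyRange_one_succ_right (by exact_mod_cast Nat.zero_le t)
    push_cast
    rw [hsplit, List.foldl_append, ih]
    simp only [List.foldl_cons, List.foldl_nil, PySem.List.pySetD_natCast]
    apply List.ext_getElem
    · simp
    · intro k h1 h2
      simp only [List.getElem_set, List.getElem_mapIdx]
      rcases eq_or_ne k t with rfl | hk
      · simp
      · have hiff : (k < t) = (k < t + 1) := by
          apply propext; constructor <;> intro h <;> omega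
        simp [if_neg (Ne.symm hk), hiff]

theorem pv_inner_fold (q : List Int) (i : Int) (hi : 0 ≤ i)
    (A : List (List Int)) (t : Nat) (ans : List Int) :
    (PySem.List.pyRange 0 (t : Int) 1).foldl (fun ans j =>
        if pvChainA (PySem.List.pyGetD A j []) q
        then PySem.List.pySetD ans i (PySem.List.pyGetD ans i 0 - 1)
        else ans) ans
      = PySem.List.pySetD ans i (PySem.List.pyGetD ans i 0 -
          ((PySem.List.pyRange 0 (t : Int) 1).map
            (fun j => pvInd (PySem.List.pyGetD A j []) q)).sum) := by
  induction t generalizing ans with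
  | zero =>
    rw [show ((0 : Nat) : Int) = 0 from rfl, PySem.List.pyRange_one_eq_nil (le_refl 0),
      List.foldl_nil, List.map_nil, List.sum_nil,
      PySem.List.pySetD_of_nonneg _ _ hi, PySem.List.pyGetD_of_nonneg _ _ hi]
    by_cases hlen : i.toNat < ans.length
    · rw [List.getD_eq_getElem?_getD, List.getElem?_eq_getElem hlen]
      simp
    · rw [List.set_eq_of_length_le (by omega)]
  | succ t ih =>
    have hsplit : PySem.List.pyRange 0 ((t : Int) + 1) 1
        = PySem.List.pyRange 0 (t : Int) 1 ++ [(t : Int)] :=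
      PySem.List.pyRange_one_succ_right (by exact_mod_cast Nat.zero_le t)
    push_cast
    rw [hsplit, List.foldl_append, ih, List.map_append, List.sum_append]
    simp only [List.foldl_cons, List.foldl_nil, List.map_cons, List.map_nil,
      List.sum_cons, List.sum_nil,
      PySem.List.pySetD_of_nonneg _ _ hi, PySem.List.pyGetD_of_nonneg _ _ hi]
    set S := ((PySem.List.pyRange 0 (t : Int) 1).map
      (fun j => pvInd (PySem.List.pyGetD A j []) q)).sum with hS
    by_cases hlen : i.toNat < ans.length
    · unfold pvInd
      split_ifs with hc
      · have hget : ((ans.set i.toNat (ans.getD i.toNat 0 - S)).getD i.toNat 0)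
            = ans.getD i.toNat 0 - S := by
          rw [List.getD_eq_getElem?_getD, List.getElem?_set_self (by simpa using hlen)]
          rfl
        rw [hget, List.set_set]
        congr 1
        ring
      · congr 1
        ring
    · have hid : ∀ v : Int, ans.set i.toNat v = ans := by
        intro v; exact List.set_eq_of_length_le (by omega)
      unfold pvInd
      split_ifs with hc <;> simp [hid]

theorem pv_sum_over_range (A : List (List Int)) (q : List Int) :
    ((PySem.List.pyRange 0 (A.length : Int) 1).map
      (fun j => pvInd (PySem.List.pyGetD A j []) q)).sum = pvCnt A q := by
  have h : ((PySem.List.pyRange 0 (A.length : Int) 1).map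
        (fun j => PySem.List.pyGetD A j ([] : List Int))) = A :=
    PySem.List.map_pyGetD_pyRange_zero A ([] : List Int)
  calc ((PySem.List.pyRange 0 (A.length : Int) 1).map
        (fun j => pvInd (PySem.List.pyGetD A j []) q)).sum
      = (((PySem.List.pyRange 0 (A.length : Int) 1).map
          (fun j => PySem.List.pyGetD A j ([] : List Int))).map
            (fun itv => pvInd itv q)).sum := by
        rw [List.map_map]; rfl
    _ = pvCnt A q := by rw [h]; rfl

theorem pv_outer_fold (A : List (List Int)) (B : List (List Int))
    (t : Nat) (ans : List Int) :
    (PySem.List.pyRange 0 (t : Int) 1).foldl (fun ans i =>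
        (PySem.List.pyRange 0 (A.length : Int) 1).foldl (fun ans j =>
          if pvChainA (PySem.List.pyGetD A j []) (PySem.List.pyGetD B i [])
          then PySem.List.pySetD ans i (PySem.List.pyGetD ans i 0 - 1)
          else ans) ans) ans
      = ans.mapIdx (fun k v => if k < t then v - pvCnt A (B.getD k []) else v) := by
  induction t generalizing ans with
  | zero =>
    rw [show ((0 : Nat) : Int) = 0 from rfl, PySem.List.pyRange_one_eq_nil (le_refl 0),
      List.foldl_nil]
    apply List.ext_getElem
    · simp
    · intro k h1 h2; simp
  | succ t ih =>
    have hsplit : PySem.List.pyRange 0 ((t : Int) + 1) 1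
        = PySem.List.pyRange 0 (t : Int) 1 ++ [(t : Int)] :=
      PySem.List.pyRange_one_succ_right (by exact_mod_cast Nat.zero_le t)
    push_cast
    rw [hsplit, List.foldl_append, ih]
    simp only [List.foldl_cons, List.foldl_nil]
    rw [pv_inner_fold _ _ (by exact_mod_cast Nat.zero_le t), pv_sum_over_range,
      PySem.List.pySetD_of_nonneg _ _ (by exact_mod_cast Nat.zero_le t),
      PySem.List.pyGetD_of_nonneg _ _ (by exact_mod_cast Nat.zero_le t)]
    simp only [Int.toNat_natCast]
    apply List.ext_getElem
    · simp
    · intro k h1 h2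
      simp only [List.getElem_set, List.getElem_mapIdx]
      rcases eq_or_ne k t with rfl | hk
      · have hkl : k < ans.length := by simpa using h2
        have hgd : (List.mapIdx
              (fun k1 v => if k1 < k then v - pvCnt A (B.getD k1 []) else v) ans).getD k 0
            = ans[k] := by
          rw [List.getD_eq_getElem?_getD, List.getElem?_mapIdx,
            List.getElem?_eq_getElem hkl]
          simp
        simp only [if_neg (lt_irrefl k), if_pos (Nat.lt_succ_self k), if_true]
        rw [hgd, PySem.List.pyGetD_natCast]
      · have hiff : (k < t) = (k < t + 1) := by
          apply propext; constructor <;> intro h <;> omega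
        simp [if_neg (Ne.symm hk), hiff]

theorem pv_a_eq (A : List (List Int)) (B : List (List Int)) :
    solve A B = B.map (fun q => (A.length : Int) - pvCnt A q) := by
  unfold solve
  dsimp only
  rw [pv_init_fold, pv_outer_fold]
  apply List.ext_getElem
  · simp
  · intro k h1 h2
    simp only [List.getElem_mapIdx, List.getElem_map]
    have hkB : k < B.length := by simpa using h2
    simp [hkB, List.getD_eq_getElem?_getD]

-- ---- B-side: generic counting and list-update facts ----

theorem pv_countP_split {α : Type} (l : List α) (p q : α → Bool) :
    l.countP p = l.countP (fun a => p a && q a) + l.countP (fun a => p a && !q a) := by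
  induction l with
  | nil => rfl
  | cons a l ih =>
    simp only [List.countP_cons, ih]
    cases hp : p a <;> cases hq : q a <;> simp <;> omega

theorem pv_setfold_untouched (V : Int × Int → Int) (k : Nat) :
    ∀ (qs : List (Int × Int)) (res : List Int),
    (∀ xi ∈ qs, xi.2 ≠ (k : Int) ∧ ∃ k' : Nat, xi.2 = (k' : Int)) →
    (qs.foldl (fun r xi => PySem.List.pySetD r xi.2 (V xi)) res)[k]? = res[k]? := by
  intro qs
  induction qs with
  | nil => intro res _; rfl
  | cons xi qs ih =>
    intro res h
    obtain ⟨hne, k', hk'⟩ := h xi (by simp)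
    rw [List.foldl_cons, ih _ (fun y hy => h y (by simp [hy]))]
    rw [hk', PySem.List.pySetD_natCast, List.getElem?_set_ne]
    intro hkk; apply hne; rw [hk', hkk]

theorem pv_setfold_get (V : Int × Int → Int) (v : Int) (k : Nat) :
    ∀ (qs : List (Int × Int)) (res : List Int), k < res.length →
    (∀ xi ∈ qs, ∃ k' : Nat, xi.2 = (k' : Int)) →
    (∀ xi ∈ qs, xi.2 = (k : Int) → V xi = v) →
    (∃ xi ∈ qs, xi.2 = (k : Int)) →
    (qs.foldl (fun r xi => PySem.List.pySetD r xi.2 (V xi)) res)[k]? = some v := by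
  intro qs
  induction qs with
  | nil => intro res _ _ _ hex; exact absurd hex (by simp)
  | cons xi qs ih =>
    intro res hlen hnat hval hex
    rw [List.foldl_cons]
    by_cases hq : ∃ xi' ∈ qs, xi'.2 = (k : Int)
    · exact ih _ (by rw [PySem.List.length_pySetD]; exact hlen)
        (fun y hy => hnat y (by simp [hy])) (fun y hy => hval y (by simp [hy])) hq
    · have hxk : xi.2 = (k : Int) := by
        obtain ⟨y, hy, hyk⟩ := hex
        rcases List.mem_cons.1 hy with rfl | hy'
        · exact hyk
        · exact absurd ⟨y, hy', hyk⟩ hq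
      rw [pv_setfold_untouched V k qs _ (fun y hy =>
        ⟨fun hc => hq ⟨y, hy, hc⟩, hnat y (by simp [hy])⟩)]
      rw [hxk, PySem.List.pySetD_natCast, List.getElem?_set_self hlen,
        hval xi (by simp) hxk]

-- ---- B-side: bisect_left / insert on a sorted list ----

theorem pv_bisect_eq_cw (ws : List Int) (W : Int) (h : ws.Pairwise (· ≤ ·)) :
    PySem.List.bisectLeft ws W = pvCw ws W := by
  obtain ⟨hb, hlt, hge⟩ := PySem.List.bisectLeft_spec ws W h
  set b := PySem.List.bisectLeft ws W with hbdef
  unfold pvCw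
  conv_rhs => rw [← List.take_append_drop b ws]
  rw [List.countP_append]
  have h1 : (ws.take b).countP (fun w => decide (w < W)) = (ws.take b).length := by
    apply List.countP_eq_length.2
    intro a ha
    obtain ⟨j, hj, rfl⟩ := List.mem_iff_getElem.1 ha
    have hj' : j < (ws.take b).length := hj
    rw [List.length_take] at hj'
    rw [List.getElem_take]
    exact decide_eq_true (hlt j (by omega) (by omega))
  have h2 : (ws.drop b).countP (fun w => decide (w < W)) = 0 := by
    apply List.countP_eq_zero.2
    intro a ha
    obtain ⟨j, hj, rfl⟩ := List.mem_iff_getElem.1 ha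
    rw [List.getElem_drop]
    have hj' : j < (ws.drop b).length := hj
    rw [List.length_drop] at hj'
    simp only [decide_eq_true_eq, not_lt]
    exact hge (b + j) (by omega) (by omega)
  rw [h1, h2, List.length_take]
  omega

theorem pv_insert_sorted (ws : List Int) (w : Int) (h : ws.Pairwise (· ≤ ·)) :
    (PySem.List.insert ws ((PySem.List.bisectLeft ws w : Nat) : Int) w).Pairwise (· ≤ ·)
    ∧ (PySem.List.insert ws ((PySem.List.bisectLeft ws w : Nat) : Int) w).Perm (w :: ws) := by
  obtain ⟨hb, hlt, hge⟩ := PySem.List.bisectLeft_spec ws w h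
  set b := PySem.List.bisectLeft ws w with hbdef
  rw [PySem.List.insert_natCast ws b w hb]
  have htake : ∀ a ∈ ws.take b, a < w := by
    intro a ha
    obtain ⟨j, hj, rfl⟩ := List.mem_iff_getElem.1 ha
    rw [List.getElem_take]
    have hj' : j < (ws.take b).length := hj
    rw [List.length_take] at hj'
    exact hlt j (by omega) (by omega)
  have hdrop : ∀ a ∈ ws.drop b, w ≤ a := by
    intro a ha
    obtain ⟨j, hj, rfl⟩ := List.mem_iff_getElem.1 ha
    rw [List.getElem_drop]
    have hj' : j < (ws.drop b).length := hj
    rw [List.length_drop] at hj'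
    exact hge (b + j) (by omega) (by omega)
  constructor
  · rw [List.pairwise_append]
    have hsp := (List.take_append_drop b ws) ▸ h
    rw [List.pairwise_append] at hsp
    obtain ⟨ht, hd, hcross⟩ := hsp
    refine ⟨ht, ?_, ?_⟩
    · exact List.pairwise_cons.2 ⟨hdrop, hd⟩
    · intro a ha y hy
      rcases List.mem_cons.1 hy with rfl | hy'
      · exact le_of_lt (htake a ha)
      · exact hcross a ha y hy'
  · have hp := List.perm_middle (a := w) (l₁ := ws.take b) (l₂ := ws.drop b)
    rw [List.take_append_drop] at hp
    exact hp

-- ---- B-side: the pointer advance and the sweep over the queries ----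

theorem pv_advance (x : Int) (rem : List (Int × Int)) (ws : List Int)
    (hrem : rem.Pairwise (fun p q => p.1 ≤ q.1)) (hws : ws.Pairwise (· ≤ ·)) :
    (pvAdvance x rem ws).1 = rem.filter (fun p => decide (¬ p.1 ≤ x))
    ∧ (pvAdvance x rem ws).2.Pairwise (· ≤ ·)
    ∧ (pvAdvance x rem ws).2.Perm
        ((rem.filter (fun p => decide (p.1 ≤ x))).map Prod.snd ++ ws) := by
  induction rem generalizing ws with
  | nil => exact ⟨rfl, hws, by simp [pvAdvance]⟩
  | cons p rest ih =>
    obtain ⟨hhead, htail⟩ := List.pairwise_cons.1 hrem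
    by_cases hpx : p.1 ≤ x
    · obtain ⟨hs, hperm⟩ := pv_insert_sorted ws p.2 hws
      have hrec := ih _ htail hs
      have hstep : pvAdvance x (p :: rest) ws
          = pvAdvance x rest
              (PySem.List.insert ws ((PySem.List.bisectLeft ws p.2 : Nat) : Int) p.2) := by
        simp [pvAdvance, hpx]
      rw [hstep]
      refine ⟨?_, hrec.2.1, ?_⟩
      · rw [hrec.1, List.filter_cons, if_neg (by simp [hpx])]
      · rw [List.filter_cons, if_pos (by simp [hpx]), List.map_cons, List.cons_append]
        exact hrec.2.2.trans ((List.Perm.append_left _ hperm).trans List.perm_middle)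
    · have hstep : pvAdvance x (p :: rest) ws = (p :: rest, ws) := by
        simp [pvAdvance, hpx]
      rw [hstep]
      have hall : ∀ a ∈ p :: rest, ¬ a.1 ≤ x := by
        intro a ha
        rcases List.mem_cons.1 ha with rfl | ha'
        · exact hpx
        · intro hc; exact hpx ((hhead a ha').trans hc)
      refine ⟨?_, hws, ?_⟩
      · rw [List.filter_eq_self.2 (fun a ha => by simpa using hall a ha)]
      · rw [List.filter_eq_nil_iff.2 (fun a ha => by simpa using hall a ha)]
        simp

theorem pv_cw_adv (x W : Int) (rem : List (Int × Int)) (ws : List Int)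
    (hrem : rem.Pairwise (fun p q => p.1 ≤ q.1)) (hws : ws.Pairwise (· ≤ ·)) :
    pvCw (pvAdvance x rem ws).2 W = pvCw ws W + pvCnt2 rem x W := by
  have h := pv_advance x rem ws hrem hws
  unfold pvCw
  rw [h.2.2.countP_eq, List.countP_append, List.countP_map, List.countP_filter]
  unfold pvCnt2
  rw [Nat.add_comm]
  congr 1
  apply List.countP_congr
  intro a _
  simp [Function.comp, Bool.and_comm]

theorem pv_sweep (B0 : List (List Int)) (pts0 : List (Int × Int)) :
    ∀ (qs : List (Int × Int)) (rem : List (Int × Int)) (ws res : List Int),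
    rem.Pairwise (fun p q => p.1 ≤ q.1) → ws.Pairwise (· ≤ ·) →
    qs.Pairwise (fun s t => s.1 ≤ t.1) →
    (∀ xi ∈ qs, pvCw ws (pvW B0 xi.2) + pvCnt2 rem xi.1 (pvW B0 xi.2)
        = pvCnt2 pts0 xi.1 (pvW B0 xi.2)) →
    (qs.foldl (pvStep B0) (rem, ws, res)).2.2
      = qs.foldl (fun r xi =>
          PySem.List.pySetD r xi.2 ((pvCnt2 pts0 xi.1 (pvW B0 xi.2) : Nat) : Int)) res := by
  intro qs
  induction qs with
  | nil => intro rem ws res _ _ _ _; rfl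
  | cons xi qs ih =>
    intro rem ws res hrem hws hqs hc
    obtain ⟨hhead, htailqs⟩ := List.pairwise_cons.1 hqs
    have hadv := pv_advance xi.1 rem ws hrem hws
    have hval : ((PySem.List.bisectLeft (pvAdvance xi.1 rem ws).2
        (PySem.List.pyGetD (PySem.List.pyGetD B0 xi.2 []) 1 0) : Nat) : Int)
        = ((pvCnt2 pts0 xi.1 (pvW B0 xi.2) : Nat) : Int) := by
      have h' : PySem.List.bisectLeft (pvAdvance xi.1 rem ws).2 (pvW B0 xi.2)
          = pvCnt2 pts0 xi.1 (pvW B0 xi.2) := by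
        rw [pv_bisect_eq_cw _ _ hadv.2.1, pv_cw_adv xi.1 _ rem ws hrem hws,
          hc xi (by simp)]
      rw [show PySem.List.pyGetD (PySem.List.pyGetD B0 xi.2 []) 1 0
          = pvW B0 xi.2 from rfl, h']
    have hstep : pvStep B0 (rem, ws, res) xi
        = ((pvAdvance xi.1 rem ws).1, (pvAdvance xi.1 rem ws).2,
           PySem.List.pySetD res xi.2 ((pvCnt2 pts0 xi.1 (pvW B0 xi.2) : Nat) : Int)) := by
      rw [pvStep, ← hval]
    rw [List.foldl_cons, List.foldl_cons, hstep]
    apply ih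
    · rw [hadv.1]; exact List.Pairwise.sublist (List.filter_sublist) hrem
    · exact hadv.2.1
    · exact htailqs
    · intro yi hyi
      rw [pv_cw_adv xi.1 _ rem ws hrem hws, hadv.1]
      have hxy : xi.1 ≤ yi.1 := hhead yi hyi
      have hsplit := pv_countP_split rem
        (fun p => decide (p.1 ≤ yi.1 ∧ p.2 < pvW B0 yi.2))
        (fun p => decide (p.1 ≤ xi.1))
      have e1 : rem.countP (fun p => decide (p.1 ≤ xi.1 ∧ p.2 < pvW B0 yi.2))
          = rem.countP (fun p => decide (p.1 ≤ yi.1 ∧ p.2 < pvW B0 yi.2)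
              && decide (p.1 ≤ xi.1)) := by
        apply List.countP_congr
        intro a _
        by_cases h1 : a.1 ≤ xi.1
        · by_cases h2 : a.2 < pvW B0 yi.2 <;> simp [h1, h2, h1.trans hxy]
        · simp [h1]
      have e2 : (rem.filter (fun p => decide (¬ p.1 ≤ xi.1))).countP
            (fun p => decide (p.1 ≤ yi.1 ∧ p.2 < pvW B0 yi.2))
          = rem.countP (fun p => decide (p.1 ≤ yi.1 ∧ p.2 < pvW B0 yi.2)
              && !decide (p.1 ≤ xi.1)) := by
        rw [List.countP_filter]
        apply List.countP_congr
        intro a _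
        by_cases h1 : a.1 ≤ xi.1 <;> simp [h1]
      have hcy := hc yi (by simp [hyi])
      unfold pvCnt2 at *
      omega

-- ---- B-side: the two dominance counts assemble the stabbing count ----

theorem pv_cnt_eq_countP (A : List (List Int)) (q : List Int) :
    pvCnt A q = ((A.countP (fun itv => pvChainA itv q) : Nat) : Int) := by
  induction A with
  | nil => rfl
  | cons a A ih =>
    simp only [pvCnt, List.map_cons, List.sum_cons, List.countP_cons] at *
    rw [ih]
    unfold pvInd
    cases h : pvChainA a q
    · simp
    · simp
      ring

theorem pv_counts (A : List (List Int)) (q : List Int) :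
    ((pvCnt2 (A.map (fun a => (PySem.List.pyGetD a 0 0, PySem.List.pyGetD a 2 0)))
        (PySem.List.pyGetD q 0 0) (PySem.List.pyGetD q 1 0) : Nat) : Int)
    - ((pvCnt2 (A.map (fun a =>
          (max (PySem.List.pyGetD a 0 0) (PySem.List.pyGetD a 1 0 + 1),
           PySem.List.pyGetD a 2 0)))
        (PySem.List.pyGetD q 0 0) (PySem.List.pyGetD q 1 0) : Nat) : Int)
    = pvCnt A q := by
  rw [pv_cnt_eq_countP]
  unfold pvCnt2
  rw [List.countP_map, List.countP_map]
  have hsplit := pv_countP_split A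
    ((fun p => decide (p.1 ≤ PySem.List.pyGetD q 0 0 ∧ p.2 < PySem.List.pyGetD q 1 0)) ∘
      (fun a => (PySem.List.pyGetD a 0 0, PySem.List.pyGetD a 2 0)))
    (fun a => decide (PySem.List.pyGetD q 0 0 ≤ PySem.List.pyGetD a 1 0))
  have e1 : A.countP (fun a =>
      ((fun p => decide (p.1 ≤ PySem.List.pyGetD q 0 0 ∧ p.2 < PySem.List.pyGetD q 1 0)) ∘
        (fun a => (PySem.List.pyGetD a 0 0, PySem.List.pyGetD a 2 0))) a
      && decide (PySem.List.pyGetD q 0 0 ≤ PySem.List.pyGetD a 1 0))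
      = A.countP (fun itv => pvChainA itv q) := by
    apply List.countP_congr
    intro a _
    simp only [Function.comp, pvChainA, Bool.and_eq_true, decide_eq_true_eq]
    tauto
  have e2 : A.countP (fun a =>
      ((fun p => decide (p.1 ≤ PySem.List.pyGetD q 0 0 ∧ p.2 < PySem.List.pyGetD q 1 0)) ∘
        (fun a => (PySem.List.pyGetD a 0 0, PySem.List.pyGetD a 2 0))) a
      && !decide (PySem.List.pyGetD q 0 0 ≤ PySem.List.pyGetD a 1 0))
      = A.countP ((fun p => decide (p.1 ≤ PySem.List.pyGetD q 0 0 ∧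
            p.2 < PySem.List.pyGetD q 1 0)) ∘
          (fun a => (max (PySem.List.pyGetD a 0 0) (PySem.List.pyGetD a 1 0 + 1),
            PySem.List.pyGetD a 2 0))) := by
    apply List.countP_congr
    intro a _
    simp only [Function.comp, Bool.and_eq_true, Bool.not_eq_true',
      decide_eq_true_eq, decide_eq_false_iff_not, max_le_iff]
    constructor
    · rintro ⟨⟨h1, h2⟩, h3⟩; exact ⟨⟨h1, by omega⟩, h2⟩
    · rintro ⟨⟨h1, h3⟩, h2⟩; exact ⟨⟨h1, h2⟩, by omega⟩
  rw [e1, e2] at hsplit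
  omega

-- ---- B-side: characterisation of dominance and of solve_alt ----

-- the query list of Source B, as the port builds it
def pvQs (B : List (List Int)) : List (Int × Int) :=
  PySem.List.sorted
    ((PySem.List.enumerate B).map (fun p => (PySem.List.pyGetD p.2 0 0, p.1)))
    (fun t => t.1)

theorem pv_mem_qs (B : List (List Int)) (xi : Int × Int) :
    xi ∈ pvQs B ↔ ∃ (k : Nat) (hk : k < B.length),
      xi = (PySem.List.pyGetD B[k] 0 0, (k : Int)) := by
  unfold pvQs
  rw [PySem.List.mem_sorted, List.mem_map]
  constructor
  · rintro ⟨p, hp, rfl⟩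
    obtain ⟨k, hk, rfl⟩ := (PySem.List.mem_enumerate_iff _ _ _).1 hp
    exact ⟨k, hk, by simp⟩
  · rintro ⟨k, hk, rfl⟩
    exact ⟨((k : Int), B[k]), (PySem.List.mem_enumerate_iff _ _ _).2 ⟨k, hk, by simp⟩, rfl⟩

theorem pv_stepfold_len (B : List (List Int)) :
    ∀ (qs : List (Int × Int)) (st : List (Int × Int) × List Int × List Int),
    (qs.foldl (pvStep B) st).2.2.length = st.2.2.length := by
  intro qs
  induction qs with
  | nil => intro st; rfl
  | cons xi qs ih =>
    intro st
    rw [List.foldl_cons, ih]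
    simp [pvStep, PySem.List.length_pySetD]

theorem pv_sweepcnt_len (B : List (List Int)) (qs : List (Int × Int))
    (points : List (Int × Int)) : (pvSweepCnt B qs points).length = B.length := by
  unfold pvSweepCnt
  rw [pv_stepfold_len]
  simp

theorem pv_xw (B : List (List Int)) (k : Nat) (hk : k < B.length) :
    pvX B (k : Int) = PySem.List.pyGetD B[k] 0 0
    ∧ pvW B (k : Int) = PySem.List.pyGetD B[k] 1 0 := by
  unfold pvX pvW
  rw [PySem.List.pyGetD_natCast, List.getD_eq_getElem?_getD, List.getElem?_eq_getElem hk]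
  exact ⟨rfl, rfl⟩

theorem pv_sweepcnt_get (B : List (List Int)) (points : List (Int × Int))
    (k : Nat) (hk : k < B.length) :
    (pvSweepCnt B (pvQs B) points)[k]?
      = some ((pvCnt2 points (pvX B (k : Int)) (pvW B (k : Int)) : Nat) : Int) := by
  unfold pvSweepCnt
  have hpts := PySem.List.sorted_pairwise points (fun p => p.1)
  have hqs := PySem.List.sorted_pairwise
    ((PySem.List.enumerate B).map (fun p => (PySem.List.pyGetD p.2 0 0, p.1)))
    (fun t => t.1)
  rw [pv_sweep B (PySem.List.sorted points (fun p => p.1)) (pvQs B) _ _ _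
    hpts List.Pairwise.nil hqs (fun xi _ => by simp [pvCw])]
  have hperm : (PySem.List.sorted points (fun p => p.1)).Perm points :=
    PySem.List.sorted_perm points (fun p => p.1) false
  have hcnt : ∀ x W, pvCnt2 (PySem.List.sorted points (fun p => p.1)) x W
      = pvCnt2 points x W := fun x W => hperm.countP_eq _
  apply pv_setfold_get
  · simpa using hk
  · intro xi hxi
    obtain ⟨k', _, rfl⟩ := (pv_mem_qs B xi).1 hxi
    exact ⟨k', rfl⟩
  · intro xi hxi hxk
    obtain ⟨k', hk', rfl⟩ := (pv_mem_qs B xi).1 hxi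
    have hxk' : (k' : Int) = (k : Int) := by simpa using hxk
    have : k' = k := by exact_mod_cast hxk'
    subst this
    rw [hcnt, (pv_xw B k' hk').1]
  · refine ⟨(PySem.List.pyGetD B[k] 0 0, (k : Int)), (pv_mem_qs B _).2 ⟨k, hk, rfl⟩, rfl⟩

theorem pv_b_eq (A : List (List Int)) (B : List (List Int)) :
    solve_alt A B = B.map (fun q => (A.length : Int) - pvCnt A q) := by
  unfold solve_alt
  dsimp only
  have hq : PySem.List.sorted
      ((PySem.List.enumerate B).map (fun p => (PySem.List.pyGetD p.2 0 0, p.1)))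
      (fun t => t.1) = pvQs B := rfl
  rw [hq]
  apply List.ext_getElem
  · simp [pv_sweepcnt_len]
  · intro k h1 h2
    have hkB : k < B.length := by simpa using h2
    have hF := pv_sweepcnt_get B
      (A.map (fun a => (PySem.List.pyGetD a 0 0, PySem.List.pyGetD a 2 0))) k hkB
    have hG := pv_sweepcnt_get B
      (A.map (fun a => (max (PySem.List.pyGetD a 0 0) (PySem.List.pyGetD a 1 0 + 1),
        PySem.List.pyGetD a 2 0))) k hkB
    obtain ⟨hbF, hFk⟩ := List.getElem?_eq_some_iff.1 hF
    obtain ⟨hbG, hGk⟩ := List.getElem?_eq_some_iff.1 hG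
    rw [List.getElem_zipWith, List.getElem_map, hFk, hGk,
      (pv_xw B k hkB).1, (pv_xw B k hkB).2]
    have := pv_counts A B[k]
    omega

-- ===== VERDICT (by name: the statement is the Claim_ definition above) =====
theorem solve_spec : Claim_equal_solve := by
  intro A B _ _
  unfold Spec_solve
  rw [pv_a_eq, pv_b_eq]
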